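-- pv_equiv track=rewrite | github.com/GlueOps/autoglue | terraform/envs/dev/scripts/gen_md.py | example_provider
-- ===== SOURCE A (Python) =====
-- def example_provider(provider_key, pblock):
--     lines = [
--         'terraform {',
--         '  required_providers {',
--         f'    autoglue = {{',
--         f'      source  = "{provider_key}"',
--         '      # version = ">= 0.0.0"',
--         '    }',
--         '  }',
--         '}',
--         '',
--         'provider "autoglue" {',
--     ]
--     for k, v in (pblock.get("attributes") or {}).items():
--         if v.get("required"):
--             lines.append(f'  {k} = "REQUIRED_{k.upper()}"')
--     for k, v in (pblock.get("attributes") or {}).items():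
--         if v.get("optional") and not v.get("computed"):
--             lines.append(f'  # {k} = "..."')
--     lines.append('}')
--     return "```hcl\n" + "\n".join(lines) + "\n```"
-- ===== SOURCE B (Python) =====
-- def example_provider(provider_key, pblock):
--     # Decorate-sort-undecorate: tag each emitted attribute line with a
--     # (category, position) key (0 = required assignment, 1 = optional comment),
--     # sort the tags, and splice the untagged lines into the fixed template.
--     tagged = []
--     for i, (k, v) in enumerate((pblock.get("attributes") or {}).items()):
--         if v.get("required"):
--             tagged.append(((0, i), f'  {k} = "REQUIRED_{k.upper()}"'))
--         if v.get("optional") and not v.get("computed"):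
--             tagged.append(((1, i), f'  # {k} = "..."'))
--     tagged.sort(key=lambda t: t[0])
--     lines = [
--         'terraform {',
--         '  required_providers {',
--         '    autoglue = {',
--         f'      source  = "{provider_key}"',
--         '      # version = ">= 0.0.0"',
--         '    }',
--         '  }',
--         '}',
--         '',
--         'provider "autoglue" {',
--     ] + [line for _, line in tagged] + ['}']
--     return "```hcl\n" + "\n".join(lines) + "\n```"
-- ===== Notes on version B (the rewrite author's own statement) =====
-- stated objective: alternative
-- what changed: B uses decorate-sort-undecorate: one loop tags each emitted line with a (category, position) sort key (0 = required, 1 = optional comment), a stable sort on the keys puts required lines before optional ones, and the untagged lines are spliced into the template, replacing A's two separate filtered scans of the attributes dict.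
import Mathlib
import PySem

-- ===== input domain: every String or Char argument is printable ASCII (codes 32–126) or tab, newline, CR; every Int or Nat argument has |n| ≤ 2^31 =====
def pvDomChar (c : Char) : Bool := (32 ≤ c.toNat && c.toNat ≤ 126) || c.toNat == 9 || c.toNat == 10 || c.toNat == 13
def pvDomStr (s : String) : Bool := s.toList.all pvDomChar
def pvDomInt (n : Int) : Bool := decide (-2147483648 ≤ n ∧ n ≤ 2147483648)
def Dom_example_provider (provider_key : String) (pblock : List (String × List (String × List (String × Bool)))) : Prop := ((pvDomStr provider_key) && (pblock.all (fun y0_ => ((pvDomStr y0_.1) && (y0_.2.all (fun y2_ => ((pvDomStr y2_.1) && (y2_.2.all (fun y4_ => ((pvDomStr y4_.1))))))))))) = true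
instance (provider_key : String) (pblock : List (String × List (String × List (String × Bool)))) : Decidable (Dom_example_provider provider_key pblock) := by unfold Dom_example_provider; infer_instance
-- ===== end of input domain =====

-- B tags each attribute line with a (category, position) key and sorts the tags
-- (decorate-sort-undecorate) instead of A's two separate filtered scans (objective: alternative).

-- dict.get on an association list: first matching key (insertion-order lookup).
def pvLookup {α : Type} (l : List (String × α)) (k : String) : Option α :=
  (l.find? (fun kv => kv.1 == k)).map (fun kv => kv.2)

-- Python truthiness of `v.get(key)` where the dict holds booleans: None and False are falsy.
def pvTruthy (o : Option Bool) : Bool := o.getD false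

-- `pblock.get("attributes") or {}`: a missing or empty attributes dict both yield {}.
def pvAttrs (pblock : List (String × List (String × List (String × Bool)))) :
    List (String × List (String × Bool)) :=
  (pvLookup pblock "attributes").getD []

def pvHeader (provider_key : String) : List String :=
  ["terraform {",
   "  required_providers {",
   "    autoglue = {",
   "      source  = \"" ++ provider_key ++ "\"",
   "      # version = \">= 0.0.0\"",
   "    }",
   "  }",
   "}",
   "",
   "provider \"autoglue\" {"]

def pvReqLine (k : String) : String := "  " ++ k ++ " = \"REQUIRED_" ++ PySem.Str.upper k ++ "\""
def pvOptLine (k : String) : String := "  # " ++ k ++ " = \"...\""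

def pvIsReq (kv : String × List (String × Bool)) : Bool :=
  pvTruthy (pvLookup kv.2 "required")
def pvIsOpt (kv : String × List (String × Bool)) : Bool :=
  pvTruthy (pvLookup kv.2 "optional") && !pvTruthy (pvLookup kv.2 "computed")

-- ===== PORT A =====
def example_provider (provider_key : String) (pblock : List (String × List (String × List (String × Bool)))) : String :=
  let lines := pvHeader provider_key
  let lines := (pvAttrs pblock).foldl
    (fun acc kv => if pvIsReq kv then acc ++ [pvReqLine kv.1] else acc) lines
  let lines := (pvAttrs pblock).foldl
    (fun acc kv => if pvIsOpt kv then acc ++ [pvOptLine kv.1] else acc) lines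
  "```hcl\n" ++ PySem.Str.join "\n" (lines ++ ["}"]) ++ "\n```"

-- ===== PORT B =====
-- single loop over enumerate(attrs) building tagged ((category, index), line) entries
def example_provider_alt (provider_key : String) (pblock : List (String × List (String × List (String × Bool)))) : String :=
  let tagged : List ((Nat × Int) × String) :=
    (PySem.List.enumerate (pvAttrs pblock)).foldl
      (fun acc p =>
        let acc := if pvIsReq p.2 then acc ++ [((0, p.1), pvReqLine p.2.1)] else acc
        if pvIsOpt p.2 then acc ++ [((1, p.1), pvOptLine p.2.1)] else acc)
      []
  let tagged := PySem.List.sorted2 tagged (fun t => t.1.1) (fun t => t.1.2)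
  "```hcl\n" ++
    PySem.Str.join "\n" (pvHeader provider_key ++ tagged.map (fun t => t.2) ++ ["}"]) ++
    "\n```"

-- ===== PRECONDITION & SPEC =====
def Spec_example_provider (provider_key : String) (pblock : List (String × List (String × List (String × Bool)))) (out : String) : Prop := out = example_provider_alt provider_key pblock
instance (provider_key : String) (pblock : List (String × List (String × List (String × Bool)))) (out : String) : Decidable (Spec_example_provider provider_key pblock out) := by unfold Spec_example_provider; infer_instance

-- ===== CLAIM (what is proved, stated in full; the proofs are below) =====
def Claim_equal_example_provider : Prop := ∀ (provider_key : String) (pblock : List (String × List (String × List (String × Bool)))), Dom_example_provider provider_key pblock → Spec_example_provider provider_key pblock (example_provider provider_key pblock)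

-- ===== LEMMAS AND PROOFS =====

-- the strict lexicographic order on the two sort keys
def pvLexLt {α κ₁ κ₂ : Type} [LinearOrder κ₁] [LinearOrder κ₂]
    (k1 : α → κ₁) (k2 : α → κ₂) (a b : α) : Prop :=
  k1 a < k1 b ∨ (k1 a = k1 b ∧ k2 a < k2 b)

theorem pvLexLt_trans {α κ₁ κ₂ : Type} [LinearOrder κ₁] [LinearOrder κ₂]
    (k1 : α → κ₁) (k2 : α → κ₂) {a b c : α}
    (h1 : pvLexLt k1 k2 a b) (h2 : pvLexLt k1 k2 b c) : pvLexLt k1 k2 a c := by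
  rcases h1 with h1 | ⟨e1, l1⟩ <;> rcases h2 with h2 | ⟨e2, l2⟩
  · exact Or.inl (lt_trans h1 h2)
  · exact Or.inl (e2 ▸ h1)
  · exact Or.inl (e1 ▸ h2)
  · exact Or.inr ⟨e1.trans e2, lt_trans l1 l2⟩

theorem pvLexLt_asymm {α κ₁ κ₂ : Type} [LinearOrder κ₁] [LinearOrder κ₂]
    (k1 : α → κ₁) (k2 : α → κ₂) {a b : α}
    (h1 : pvLexLt k1 k2 a b) (h2 : pvLexLt k1 k2 b a) : False := by
  rcases h1 with h1 | ⟨e1, l1⟩ <;> rcases h2 with h2 | ⟨e2, l2⟩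
  · exact absurd (lt_trans h1 h2) (lt_irrefl _)
  · exact absurd h1 (e2 ▸ lt_irrefl _)
  · exact absurd h2 (e1 ▸ lt_irrefl _)
  · exact absurd (lt_trans l1 l2) (lt_irrefl _)

theorem pvBefore_iff {α κ₁ κ₂ : Type} [LinearOrder κ₁] [LinearOrder κ₂]
    (k1 : α → κ₁) (k2 : α → κ₂) (a b : α) :
    (decide (k1 a < k1 b) || (!decide (k1 b < k1 a) && decide (k2 a < k2 b))) = true
      ↔ pvLexLt k1 k2 a b := by
  simp only [Bool.or_eq_true, Bool.and_eq_true, Bool.not_eq_eq_eq_not, Bool.not_true,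
    decide_eq_true_eq, decide_eq_false_iff_not, pvLexLt]
  constructor
  · rintro (h | ⟨h1, h2⟩)
    · exact Or.inl h
    · rcases lt_or_ge (k1 a) (k1 b) with h | h
      · exact Or.inl h
      · exact Or.inr ⟨le_antisymm (le_of_not_gt h1) h, h2⟩
  · rintro (h | ⟨h1, h2⟩)
    · exact Or.inl h
    · exact Or.inr ⟨by simp [h1], h2⟩

-- insertion keeps the list sorted w.r.t. the lexicographic order
theorem pvInsertBy_pairwise {α κ₁ κ₂ : Type} [LinearOrder κ₁] [LinearOrder κ₂]
    (k1 : α → κ₁) (k2 : α → κ₂) (x : α) (ys : List α)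
    (h : ys.Pairwise (fun a b => ¬ pvLexLt k1 k2 b a)) :
    (PySem.List.insertBy
        (fun a b => decide (k1 a < k1 b) || (!decide (k1 b < k1 a) && decide (k2 a < k2 b)))
        x ys).Pairwise (fun a b => ¬ pvLexLt k1 k2 b a) := by
  induction ys with
  | nil => simp [PySem.List.insertBy]
  | cons y ys ih =>
    rw [List.pairwise_cons] at h
    obtain ⟨hy, hys⟩ := h
    show (PySem.List.insertBy _ x (y :: ys)).Pairwise _
    rw [PySem.List.insertBy]
    split
    · rename_i hb
      rw [pvBefore_iff] at hb
      refine List.pairwise_cons.2 ⟨?_, List.pairwise_cons.2 ⟨hy, hys⟩⟩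
      intro z hz hzx
      rcases List.mem_cons.1 hz with rfl | hz
      · exact pvLexLt_asymm k1 k2 hb hzx
      · exact hy z hz (pvLexLt_trans k1 k2 hzx hb)
    · rename_i hb
      rw [Bool.not_eq_true, ← Bool.not_eq_true] at hb
      have hb' : ¬ pvLexLt k1 k2 x y := by
        intro h; exact hb ((pvBefore_iff k1 k2 x y).2 h)
      refine List.pairwise_cons.2 ⟨?_, ih hys⟩
      intro z hz
      rcases (PySem.List.insertBy_mem_iff _ _ _ _).1 hz with rfl | hz
      · exact hb'
      · exact hy z hz

-- the insertion-sort fold is a permutation of the input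
theorem pvFoldl_insertBy_perm {α : Type} (before : α → α → Bool) (xs acc : List α) :
    (xs.foldl (fun acc x => PySem.List.insertBy before x acc) acc).Perm (acc ++ xs) := by
  induction xs generalizing acc with
  | nil => simp
  | cons x xs ih =>
    simp only [List.foldl_cons]
    refine (ih _).trans ?_
    refine (List.Perm.append_right xs (PySem.List.insertBy_perm before x acc)).trans ?_
    simpa using (List.perm_middle (a := x) (l₁ := acc) (l₂ := xs)).symm

-- the sorted order is unique: any strictly lex-increasing rearrangement IS sorted2
theorem pvSorted2_eq_of_perm_of_pairwise {α κ₁ κ₂ : Type} [LinearOrder κ₁] [LinearOrder κ₂]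
    (xs ys : List α) (k1 : α → κ₁) (k2 : α → κ₂)
    (hp : ys.Perm xs) (hs : ys.Pairwise (pvLexLt k1 k2)) :
    PySem.List.sorted2 xs k1 k2 = ys := by
  have hres_perm : (PySem.List.sorted2 xs k1 k2).Perm xs := by
    simpa using pvFoldl_insertBy_perm
      (fun a b => decide (k1 a < k1 b) || (!decide (k1 b < k1 a) && decide (k2 a < k2 b))) xs []
  have hres_pw : (PySem.List.sorted2 xs k1 k2).Pairwise (fun a b => ¬ pvLexLt k1 k2 b a) := by
    show (xs.foldl _ ([] : List α)).Pairwise _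
    have : ∀ (l acc : List α), acc.Pairwise (fun a b => ¬ pvLexLt k1 k2 b a) →
        (l.foldl (fun acc x => PySem.List.insertBy
          (fun a b => decide (k1 a < k1 b) || (!decide (k1 b < k1 a) && decide (k2 a < k2 b)))
          x acc) acc).Pairwise (fun a b => ¬ pvLexLt k1 k2 b a) := by
      intro l
      induction l with
      | nil => intro acc h; exact h
      | cons x l ih =>
        intro acc h
        exact ih _ (pvInsertBy_pairwise k1 k2 x acc h)
    exact this xs [] (List.Pairwise.nil)
  have hys_pw : ys.Pairwise (fun a b => ¬ pvLexLt k1 k2 b a) :=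
    hs.imp (fun hab hba => pvLexLt_asymm k1 k2 hab hba)
  -- a,b with equal keys occurring in ys must coincide (ys is strictly increasing)
  have hkey : ∀ a ∈ ys, ∀ b ∈ ys, k1 a = k1 b → k2 a = k2 b → a = b := by
    intro a ha b hb e1 e2
    by_contra hne
    have hsym : Symmetric (fun a b => pvLexLt k1 k2 a b ∨ pvLexLt k1 k2 b a) := by
      intro a b h; tauto
    have := (hs.imp (fun h => Or.inl h) : ys.Pairwise
      (fun a b => pvLexLt k1 k2 a b ∨ pvLexLt k1 k2 b a)).forall hsym ha hb hne
    rcases this with h | h <;> rcases h with h | ⟨_, h⟩ <;> simp [e1, e2] at h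
  refine List.Perm.eq_of_pairwise ?_ hres_pw hys_pw (hres_perm.trans hp.symm)
  intro a b ha hb h1 h2
  have haY : a ∈ ys := hp.mem_iff.2 (hres_perm.subset ha)
  have : k1 a = k1 b ∧ k2 a = k2 b := by
    by_contra hc
    rcases lt_trichotomy (k1 a) (k1 b) with h | h | h
    · exact h2 (Or.inl h)
    · rcases lt_trichotomy (k2 a) (k2 b) with h' | h' | h'
      · exact h2 (Or.inr ⟨h, h'⟩)
      · exact hc ⟨h, h'⟩
      · exact h1 (Or.inr ⟨h.symm, h'⟩)
    · exact h1 (Or.inl h)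
  exact hkey a haY b hb this.1 this.2

-- B's tagging loop, as a flatMap over the enumerated attributes
theorem pvTagged_eq_flatMap (e : List (Int × (String × List (String × Bool))))
    (acc : List ((Nat × Int) × String)) :
    e.foldl
      (fun acc p =>
        let acc := if pvIsReq p.2 then acc ++ [((0, p.1), pvReqLine p.2.1)] else acc
        if pvIsOpt p.2 then acc ++ [((1, p.1), pvOptLine p.2.1)] else acc)
      acc
    = acc ++ e.flatMap (fun p =>
        (if pvIsReq p.2 then [((0, p.1), pvReqLine p.2.1)] else [])
        ++ (if pvIsOpt p.2 then [((1, p.1), pvOptLine p.2.1)] else [])) := by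
  induction e generalizing acc with
  | nil => simp
  | cons p e ih =>
    simp only [List.foldl_cons, List.flatMap_cons, ih]
    by_cases h1 : pvIsReq p.2 <;> by_cases h2 : pvIsOpt p.2 <;> simp [h1, h2]

-- the req-tags followed by the opt-tags
def pvReqTags (e : List (Int × (String × List (String × Bool)))) : List ((Nat × Int) × String) :=
  (e.filter (fun p => pvIsReq p.2)).map (fun p => ((0, p.1), pvReqLine p.2.1))
def pvOptTags (e : List (Int × (String × List (String × Bool)))) : List ((Nat × Int) × String) :=
  (e.filter (fun p => pvIsOpt p.2)).map (fun p => ((1, p.1), pvOptLine p.2.1))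

theorem pvFlatMap_perm (e : List (Int × (String × List (String × Bool)))) :
    (pvReqTags e ++ pvOptTags e).Perm
      (e.flatMap (fun p =>
        (if pvIsReq p.2 then [((0, p.1), pvReqLine p.2.1)] else [])
        ++ (if pvIsOpt p.2 then [((1, p.1), pvOptLine p.2.1)] else []))) := by
  induction e with
  | nil => simp [pvReqTags, pvOptTags]
  | cons p e ih =>
    simp only [List.flatMap_cons, pvReqTags, pvOptTags, List.filter_cons] at *
    by_cases h1 : pvIsReq p.2 <;> by_cases h2 : pvIsOpt p.2 <;>
      simp only [h1, h2, ite_true, ite_false, Bool.false_eq_true, List.map_cons,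
        List.cons_append, List.nil_append, List.append_nil]
    · exact (List.Perm.trans List.perm_middle (ih.cons _)).cons _
    · exact ih.cons _
    · exact List.Perm.trans List.perm_middle (ih.cons _)
    · exact ih
-- (branch bookkeeping; see simp cases above)

theorem pvTags_pairwise (attrs : List (String × List (String × Bool))) :
    (pvReqTags (PySem.List.enumerate attrs) ++ pvOptTags (PySem.List.enumerate attrs)).Pairwise
      (pvLexLt (fun t : (Nat × Int) × String => t.1.1) (fun t => t.1.2)) := by
  have henum := PySem.List.pairwise_lt_enumerate (xs := attrs) (s := 0)
  rw [List.pairwise_append]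
  refine ⟨?_, ?_, ?_⟩
  · refine List.Pairwise.map _ ?_ (henum.filter _)
    intro a b h
    exact Or.inr ⟨rfl, h⟩
  · refine List.Pairwise.map _ ?_ (henum.filter _)
    intro a b h
    exact Or.inr ⟨rfl, h⟩
  · intro a ha b hb
    simp only [pvReqTags, pvOptTags, List.mem_map] at ha hb
    obtain ⟨p, _, rfl⟩ := ha
    obtain ⟨q, _, rfl⟩ := hb
    exact Or.inl (by norm_num)

-- undecorate: the tag lines in order are A's two filtered scans
theorem pvMap_snd_tags (attrs : List (String × List (String × Bool))) :
    (pvReqTags (PySem.List.enumerate attrs) ++ pvOptTags (PySem.List.enumerate attrs)).map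
        (fun t => t.2)
      = (attrs.filter pvIsReq).map (fun kv => pvReqLine kv.1)
        ++ (attrs.filter pvIsOpt).map (fun kv => pvOptLine kv.1) := by
  have h : ∀ (P : String × List (String × Bool) → Bool)
      (f : String × List (String × Bool) → String),
      ((PySem.List.enumerate attrs).filter (fun p => P p.2)).map (fun p => f p.2)
        = (attrs.filter P).map f := by
    intro P f
    conv_rhs => rw [← PySem.List.map_snd_enumerate (xs := attrs) (s := 0)]
    rw [List.filter_map, List.map_map]
    rfl
  simp only [pvReqTags, pvOptTags, List.map_append, List.map_map]
  rw [show ((fun t : (Nat × Int) × String => t.2) ∘ fun p : Int × (String × List (String × Bool)) => ((0, p.1), pvReqLine p.2.1)) = fun p => pvReqLine p.2.1 from rfl,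
      show ((fun t : (Nat × Int) × String => t.2) ∘ fun p : Int × (String × List (String × Bool)) => ((1, p.1), pvOptLine p.2.1)) = fun p => pvOptLine p.2.1 from rfl]
  rw [h pvIsReq (fun kv => pvReqLine kv.1), h pvIsOpt (fun kv => pvOptLine kv.1)]

-- ===== VERDICT (by name: the statement is the Claim_ definition above) =====
theorem example_provider_spec : Claim_equal_example_provider := by
  intro provider_key pblock _
  show example_provider provider_key pblock = example_provider_alt provider_key pblock
  simp only [example_provider, example_provider_alt, pvTagged_eq_flatMap, List.nil_append]
  rw [pvSorted2_eq_of_perm_of_pairwise _ _ _ _ (pvFlatMap_perm _) (pvTags_pairwise _),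
    pvMap_snd_tags]
  simp only [PySem.List.foldl_append_if]
  simp [List.append_assoc]
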